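-- pv_equiv track=rewrite | github.com/techsharma04/CodingInvaders | Assignments/Module-35-Atul-Sharma-Python/Assignment 4.py | largest_positive
-- ===== SOURCE A (Python) =====
-- def largest_positive(arr):
--     posNo = 0
--
--     for i in arr:
--         if i > 0 and -i in arr and i > posNo:
--             posNo = i
--     if (
--         posNo == 0
--     ):  # because mentioned no zero in array, so if it has zero, then it means
--         # no greater positive integer
--         return -1
--     else:
--         return posNo
-- ===== SOURCE B (Python) =====
-- def largest_positive(arr):
--     s = set(arr)
--     for i in sorted(arr, reverse=True):
--         if i > 0 and -i in s:
--             return i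
--     return -1
-- ===== Notes on version B (the rewrite author's own statement) =====
-- stated objective: alternative
-- what changed: Replaces A's repeated-max accumulation with a membership test inside the loop by building a set once, sorting descending, and early-returning the first positive element whose negation is in the set.
import Mathlib
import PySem

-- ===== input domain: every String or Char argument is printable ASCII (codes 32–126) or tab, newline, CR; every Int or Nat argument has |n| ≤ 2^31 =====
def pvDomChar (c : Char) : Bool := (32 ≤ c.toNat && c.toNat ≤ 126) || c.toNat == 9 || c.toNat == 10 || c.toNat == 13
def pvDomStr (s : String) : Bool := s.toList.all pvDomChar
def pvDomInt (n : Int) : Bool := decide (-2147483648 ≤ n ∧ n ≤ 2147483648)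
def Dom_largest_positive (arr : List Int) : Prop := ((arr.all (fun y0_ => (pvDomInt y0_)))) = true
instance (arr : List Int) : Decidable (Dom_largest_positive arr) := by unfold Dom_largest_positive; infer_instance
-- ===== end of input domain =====

-- B builds a set once and early-returns the first positive element of the descending sort whose
-- negation is present, instead of A's repeated-max accumulation ('alternative').

-- ===== PORT A =====
def largest_positive (arr : List Int) : Int :=
  let posNo := arr.foldl (fun posNo i => if 0 < i ∧ (-i) ∈ arr ∧ posNo < i then i else posNo) 0
  if posNo = 0 then -1 else posNo

-- ===== PORT B =====
-- the early-returning 'for' loop of Source B over the sorted list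
def lpScan (s : PySem.Set Int) : List Int → Int
  | [] => -1
  | i :: rest => if 0 < i ∧ (-i) ∈ s then i else lpScan s rest

def largest_positive_alt (arr : List Int) : Int :=
  lpScan (PySem.Set.ofList arr) (PySem.List.sorted arr (fun x => x) true)

-- ===== PRECONDITION & SPEC =====
def Spec_largest_positive (arr : List Int) (out : Int) : Prop := out = largest_positive_alt arr
instance (arr : List Int) (out : Int) : Decidable (Spec_largest_positive arr out) := by unfold Spec_largest_positive; infer_instance

-- ===== CLAIM (what is proved, stated in full; the proofs are below) =====
def Claim_equal_largest_positive : Prop := ∀ (arr : List Int), Dom_largest_positive arr → Spec_largest_positive arr (largest_positive arr)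

-- ===== LEMMAS AND PROOFS =====

-- the candidate predicate: positive and the negation occurs in arr
def lpP (arr : List Int) (i : Int) : Bool := decide (0 < i) ∧ decide ((-i) ∈ arr)

-- A's loop is a running max over the candidates
theorem lp_foldl_eq_filter_max (arr l : List Int) (acc : Int) :
    l.foldl (fun posNo i => if 0 < i ∧ (-i) ∈ arr ∧ posNo < i then i else posNo) acc
      = (l.filter (lpP arr)).foldl max acc := by
  induction l generalizing acc with
  | nil => rfl
  | cons i t ih =>
    by_cases hp : lpP arr i = true
    · have hp' : 0 < i ∧ (-i) ∈ arr := by simpa [lpP] using hp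
      simp only [List.foldl, List.filter, hp]
      have : (if 0 < i ∧ (-i) ∈ arr ∧ acc < i then i else acc) = max acc i := by
        rcases hp' with ⟨h1, h2⟩
        by_cases hlt : acc < i
        · rw [if_pos ⟨h1, h2, hlt⟩]; omega
        · rw [if_neg (by tauto)]; omega
      rw [this, ih]
    · have hni : ¬ (0 < i ∧ (-i) ∈ arr ∧ acc < i) := by
        have := hp
        simp only [lpP, decide_eq_true_eq] at this
        tauto
      simp only [List.foldl, List.filter, hp, if_neg hni]
      exact ih acc

theorem lp_foldl_max_of_le (t : List Int) (a : Int) (h : ∀ y ∈ t, y ≤ a) :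
    t.foldl max a = a := by
  induction t with
  | nil => rfl
  | cons x r ih =>
    have hx : max a x = a := by have := h x (by simp); omega
    simp only [List.foldl, hx]
    exact ih (fun y hy => h y (by simp [hy]))

-- foldl max is invariant under permutation
theorem lp_foldl_max_perm {l l' : List Int} (h : l.Perm l') (a : Int) :
    l.foldl max a = l'.foldl max a := by
  induction h generalizing a with
  | nil => rfl
  | cons x _ ih => simp only [List.foldl]; exact ih _
  | swap x y l =>
      simp only [List.foldl]
      have : max (max a y) x = max (max a x) y := by omega
      rw [this]
  | trans _ _ ih1 ih2 => exact (ih1 a).trans (ih2 a)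

-- B's scan returns the head of the filtered list (or -1)
theorem lpScan_eq_filter (s : PySem.Set Int) (l : List Int) :
    lpScan s l = (match l.filter (fun i => decide (0 < i) && decide ((-i) ∈ s)) with
                  | [] => -1
                  | x :: _ => x) := by
  induction l with
  | nil => rfl
  | cons i t ih =>
    by_cases h : 0 < i ∧ (-i) ∈ s
    · simp [lpScan, List.filter, h]
    · simp only [lpScan, if_neg h, List.filter]
      have : (decide (0 < i) && decide ((-i) ∈ s)) = false := by
        simp only [Bool.and_eq_false_iff, decide_eq_false_iff_not]
        tauto
      rw [this, ih]

theorem lp_filter_congr (arr : List Int) (l : List Int) :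
    l.filter (fun i => decide (0 < i) && decide ((-i) ∈ PySem.Set.ofList arr))
      = l.filter (lpP arr) := by
  apply List.filter_congr
  intro i _
  simp [lpP, PySem.Set.mem_ofList]

-- ===== VERDICT (by name: the statement is the Claim_ definition above) =====
theorem largest_positive_spec : Claim_equal_largest_positive := by
  intro arr _
  unfold Spec_largest_positive largest_positive largest_positive_alt
  rw [lpScan_eq_filter, lp_filter_congr, lp_foldl_eq_filter_max]
  set L := PySem.List.sorted arr (fun x => x) true with hL
  have hperm : (L.filter (lpP arr)).Perm (arr.filter (lpP arr)) :=
    (PySem.List.sorted_perm (xs := arr) (key := fun x => x) (rev := true)).filter _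
  have hdesc : L.Pairwise (fun a b => b ≤ a) :=
    PySem.List.sorted_pairwise_rev (xs := arr) (key := fun x => x)
  have hmax : (arr.filter (lpP arr)).foldl max 0 = (L.filter (lpP arr)).foldl max 0 :=
    (lp_foldl_max_perm hperm.symm 0)
  rw [hmax]
  cases hF : L.filter (lpP arr) with
  | nil => simp
  | cons x t =>
    have hxmem : x ∈ L.filter (lpP arr) := by rw [hF]; simp
    have hxP : lpP arr x = true := (List.mem_filter.mp hxmem).2
    have hxpos : 0 < x := by
      simp only [lpP, decide_eq_true_eq] at hxP
      exact hxP.1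
    have hdescF : (L.filter (lpP arr)).Pairwise (fun a b => b ≤ a) := hdesc.filter _
    have hle : ∀ y ∈ t, y ≤ x := by
      rw [hF] at hdescF
      exact fun y hy => (List.pairwise_cons.mp hdescF).1 y hy
    have : (x :: t).foldl max 0 = x := by
      simp only [List.foldl]
      have h0 : max 0 x = x := by omega
      rw [h0]
      exact lp_foldl_max_of_le t x hle
    rw [this]
    simp only [if_neg (by omega : ¬ x = 0)]
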